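-- pv_equiv track=rewrite | github.com/livestreamx/graph-ui-convertor | domain/services/build_team_procedure_graph.py | _slug_token
-- ===== SOURCE A (Python) =====
-- def _slug_token(value: str) -> str:
--     chars: list[str] = []
--     for char in value.lower():
--         if char.isalnum():
--             chars.append(char)
--             continue
--         if chars and chars[-1] == "_":
--             continue
--         chars.append("_")
--     slug = "".join(chars).strip("_")
--     return slug if slug else "unknown"
-- ===== SOURCE B (Python) =====
-- def _slug_token(value: str) -> str:
--     # Tokenize: collect maximal alphanumeric runs, then join them with "_".
--     tokens: list[str] = []
--     cur: list[str] = []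
--     for char in value.lower():
--         if char.isalnum():
--             cur.append(char)
--         elif cur:
--             tokens.append("".join(cur))
--             cur = []
--     if cur:
--         tokens.append("".join(cur))
--     slug = "_".join(tokens)
--     return slug if slug else "unknown"
-- ===== Notes on version B (the rewrite author's own statement) =====
-- stated objective: alternative
-- what changed: Replaces the character loop that emits underscore separators using last-char-was-underscore state plus a final two-sided strip by a tokenize-then-join pass: collect the maximal alphanumeric runs and join them with single underscores, which collapses separators and avoids edge underscores by construction.
import Mathlib
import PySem

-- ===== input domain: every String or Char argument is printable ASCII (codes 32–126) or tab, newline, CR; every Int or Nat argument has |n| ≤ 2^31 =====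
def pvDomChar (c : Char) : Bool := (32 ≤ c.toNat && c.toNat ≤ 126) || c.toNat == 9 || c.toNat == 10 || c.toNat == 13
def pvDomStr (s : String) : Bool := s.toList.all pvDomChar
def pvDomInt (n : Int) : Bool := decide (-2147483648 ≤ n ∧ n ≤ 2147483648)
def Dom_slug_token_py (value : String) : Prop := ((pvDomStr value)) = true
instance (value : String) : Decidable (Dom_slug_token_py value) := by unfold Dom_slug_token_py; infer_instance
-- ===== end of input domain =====

-- B replaces A's underscore-emitting loop (with last-char state and a final strip('_'))
-- by a tokenize-then-join pass over maximal alphanumeric runs; same cost, different structure.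


-- ===== PORT A =====
-- loop body of A: append alnum chars; for a separator, skip if the last emitted char
-- is already '_' ('chars and chars[-1] == "_"'), else append '_'
def pvStepA (acc : List Char) (c : Char) : List Char :=
  if PySem.Chars.isalnum c then acc ++ [c]
  else if acc.getLast? == some '_' then acc
  else acc ++ ['_']

def slug_token_py (value : String) : String :=
  let chars : List Char := (PySem.Str.lower value).toList.foldl pvStepA []
  -- '"".join(chars).strip("_")' : join of one-char strings is the char list itself,
  -- stripped with PySem.Chars.stripChars (the list form of str.strip(chars))
  let slug : List Char := PySem.Chars.stripChars chars ['_']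
  if slug ≠ [] then String.mk slug else "unknown"

-- ===== PORT B =====
-- loop body of B: grow the current alnum run; a separator flushes a non-empty run
def pvStepB (st : List (List Char) × List Char) (c : Char) : List (List Char) × List Char :=
  if PySem.Chars.isalnum c then (st.1, st.2 ++ [c])
  else if st.2 ≠ [] then (st.1 ++ [st.2], []) else st

def slug_token_py_alt (value : String) : String :=
  let st := (PySem.Str.lower value).toList.foldl pvStepB ([], [])
  let toks := if st.2 ≠ [] then st.1 ++ [st.2] else st.1
  let slug : List Char := PySem.Chars.join ['_'] toks   -- '"_".join(tokens)'
  if slug ≠ [] then String.mk slug else "unknown"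

-- ===== PRECONDITION & SPEC =====
def Spec_slug_token_py (value : String) (out : String) : Prop := out = slug_token_py_alt value
instance (value : String) (out : String) : Decidable (Spec_slug_token_py value out) := by unfold Spec_slug_token_py; infer_instance

-- ===== CLAIM (what is proved, stated in full; the proofs are below) =====
def Claim_equal_slug_token_py : Prop := ∀ (value : String), Dom_slug_token_py value → Spec_slug_token_py value (slug_token_py value)

-- ===== LEMMAS AND PROOFS =====

-- A's accumulator, expressed from B's state (toks, cur) plus a possible leading '_'
def pvAccOf (lead : List Char) (toks : List (List Char)) (cur : List Char) : List Char :=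
  if cur ≠ [] then lead ++ List.intercalate ['_'] (toks ++ [cur])
  else if toks ≠ [] then lead ++ List.intercalate ['_'] toks ++ ['_']
  else lead

lemma pvIcConcat (s t : List Char) (toks : List (List Char)) (h : toks ≠ []) :
    List.intercalate s (toks ++ [t]) = List.intercalate s toks ++ s ++ t := by
  induction toks with
  | nil => simp at h
  | cons x xs ih =>
    cases xs with
    | nil => simp [List.intercalate, List.intersperse]
    | cons y ys =>
      have key : ∀ (z : List Char) (zs : List (List Char)),
          List.intercalate s (x :: z :: zs) = x ++ s ++ List.intercalate s (z :: zs) := by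
        intro z zs; simp [List.intercalate, List.intersperse]
      simp only [List.cons_append]
      rw [key y (ys ++ [t]), key y ys]
      have hr := ih (by simp)
      simp only [List.cons_append] at hr
      rw [hr]; simp

lemma pvGetLastAppend (l1 l2 : List Char) (h : l2 ≠ []) :
    (l1 ++ l2).getLast? = l2.getLast? := by
  cases e : l2.getLast? with
  | none => exact absurd (List.getLast?_eq_none_iff.mp e) h
  | some v => simp [e]

lemma pvIcSingleton (s t : List Char) : List.intercalate s [t] = t := by
  simp [List.intercalate, List.intersperse]

lemma pvIcCons (s t0 y : List Char) (ys : List (List Char)) :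
    List.intercalate s (t0 :: y :: ys) = t0 ++ s ++ List.intercalate s (y :: ys) := by
  simp [List.intercalate, List.intersperse]

lemma pvIcNe (toks : List (List Char)) (h : toks ≠ []) (ht : ∀ t ∈ toks, t ≠ [] ∧ '_' ∉ t) :
    List.intercalate ['_'] toks ≠ [] := by
  cases toks with
  | nil => simp at h
  | cons t0 rest =>
    obtain ⟨hne, -⟩ := ht t0 (by simp)
    obtain ⟨a, t0', rfl⟩ := List.exists_cons_of_ne_nil hne
    cases rest with
    | nil => simp [pvIcSingleton]
    | cons y ys => simp [pvIcCons]

lemma pvJoinHead (toks : List (List Char)) (h : toks ≠ []) (ht : ∀ t ∈ toks, t ≠ [] ∧ '_' ∉ t) :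
    (List.intercalate ['_'] toks).head? ≠ some '_' := by
  cases toks with
  | nil => simp at h
  | cons t0 rest =>
    obtain ⟨hne, hmem⟩ := ht t0 (by simp)
    obtain ⟨a, t0', rfl⟩ := List.exists_cons_of_ne_nil hne
    have ha : a ≠ '_' := fun e => hmem (e ▸ List.mem_cons_self)
    cases rest with
    | nil => simpa [pvIcSingleton] using ha
    | cons y ys => simpa [pvIcCons] using ha

lemma pvJoinLast (toks : List (List Char)) (h : toks ≠ []) (ht : ∀ t ∈ toks, t ≠ [] ∧ '_' ∉ t) :
    (List.intercalate ['_'] toks).getLast? ≠ some '_' := by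
  induction toks with
  | nil => simp at h
  | cons t0 rest ih =>
    obtain ⟨hne, hmem⟩ := ht t0 (by simp)
    cases rest with
    | nil =>
      rw [pvIcSingleton]
      intro e
      exact hmem (List.mem_of_getLast? e)
    | cons y ys =>
      have h2 : (y :: ys : List (List Char)) ≠ [] := by simp
      have ht2 : ∀ t ∈ (y :: ys), t ≠ [] ∧ '_' ∉ t := fun t htm => ht t (by simp [htm])
      rw [pvIcCons, List.append_assoc,
        pvGetLastAppend _ _ (by simp),
        pvGetLastAppend _ _ (pvIcNe _ h2 ht2)]
      exact ih h2 ht2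

lemma pvUnderscoreNotAlnum : PySem.Chars.isalnum '_' = false := by decide

-- one step of the two loops preserves the relation between A's accumulator and B's state
lemma pvStepRel (c : Char) (lead : List Char) (toks : List (List Char)) (cur : List Char)
    (hl : lead = [] ∨ lead = ['_'])
    (ht : ∀ t ∈ toks, t ≠ [] ∧ '_' ∉ t) (hc : '_' ∉ cur) :
    ∃ lead', (lead' = [] ∨ lead' = ['_']) ∧
      (∀ t ∈ (pvStepB (toks, cur) c).1, t ≠ [] ∧ '_' ∉ t) ∧
      '_' ∉ (pvStepB (toks, cur) c).2 ∧
      pvStepA (pvAccOf lead toks cur) c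
        = pvAccOf lead' (pvStepB (toks, cur) c).1 (pvStepB (toks, cur) c).2 := by
  by_cases hal : PySem.Chars.isalnum c = true
  · -- alphanumeric: both sides append c
    have hcu : c ≠ '_' := by
      intro e; rw [e, pvUnderscoreNotAlnum] at hal; exact Bool.false_ne_true hal
    refine ⟨lead, hl, ?_, ?_, ?_⟩
    · simpa [pvStepB, hal] using ht
    · simp only [pvStepB, hal, if_pos]
      intro hm
      rcases List.mem_append.mp hm with h1 | h1
      · exact hc h1
      · have h2 : '_' = c := by simpa using h1
        exact hcu h2.symm
    · simp only [pvStepA, pvStepB, hal, if_pos]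
      by_cases hcur : cur = []
      · subst hcur
        by_cases htk : toks = []
        · subst htk; simp [pvAccOf, pvIcSingleton]
        · simp [pvAccOf, htk, pvIcConcat ['_'] [c] toks htk]
      · by_cases htk : toks = []
        · subst htk; simp [pvAccOf, hcur, pvIcSingleton]
        · have e1 := pvIcConcat ['_'] cur toks htk
          have e2 := pvIcConcat ['_'] (cur ++ [c]) toks htk
          simp [pvAccOf, hcur, e1, e2]
  · -- separator
    have hal' : PySem.Chars.isalnum c = false := by simpa using hal
    by_cases hcur : cur = []
    · subst hcur
      by_cases htk : toks = []
      · subst htk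
        refine ⟨['_'], Or.inr rfl, ?_, ?_, ?_⟩
        · simp [pvStepB, hal']
        · simp [pvStepB, hal']
        · rcases hl with rfl | rfl <;>
            simp [pvStepA, pvStepB, pvAccOf, hal']
      · refine ⟨lead, hl, ?_, ?_, ?_⟩
        · simpa [pvStepB, hal'] using ht
        · simp [pvStepB, hal']
        · have hacc : pvAccOf lead toks [] = lead ++ List.intercalate ['_'] toks ++ ['_'] := by
            simp [pvAccOf, htk]
          have hlast : (pvAccOf lead toks []).getLast? = some '_' := by
            rw [hacc, pvGetLastAppend _ _ (by simp)]; simp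
          simp [pvStepA, pvStepB, hal', hlast]
    · -- cur ≠ []: B flushes the run, A appends one '_'
      have hic : pvAccOf lead toks cur = lead ++ List.intercalate ['_'] (toks ++ [cur]) := by
        simp [pvAccOf, hcur]
      have htF : ∀ t ∈ toks ++ [cur], t ≠ [] ∧ '_' ∉ t := by
        intro t htm
        rcases List.mem_append.mp htm with h1 | h1
        · exact ht t h1
        · obtain rfl : t = cur := by simpa using h1
          exact ⟨hcur, hc⟩
      have hlast : (pvAccOf lead toks cur).getLast? ≠ some '_' := by
        rw [hic, pvGetLastAppend _ _ (pvIcNe (toks ++ [cur]) (by simp) htF)]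
        exact pvJoinLast (toks ++ [cur]) (by simp) htF
      refine ⟨lead, hl, ?_, ?_, ?_⟩
      · simp only [pvStepB, hal', Bool.false_eq_true, if_false, ne_eq, hcur,
          not_false_iff, if_pos]
        exact htF
      · simp [pvStepB, hal', hcur]
      · have hcond : ((pvAccOf lead toks cur).getLast? == some '_') = false :=
          beq_eq_false_iff_ne.mpr hlast
        simp only [pvStepA, pvStepB, hal', Bool.false_eq_true, if_false, hcond,
          ne_eq, hcur, not_false_iff, if_pos]
        rw [hic]
        simp [pvAccOf]

-- the whole loops preserve the relation
lemma pvLoopRel (ls : List Char) (lead : List Char) (toks : List (List Char)) (cur : List Char)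
    (hl : lead = [] ∨ lead = ['_'])
    (ht : ∀ t ∈ toks, t ≠ [] ∧ '_' ∉ t) (hc : '_' ∉ cur) :
    ∃ lead', (lead' = [] ∨ lead' = ['_']) ∧
      (∀ t ∈ (ls.foldl pvStepB (toks, cur)).1, t ≠ [] ∧ '_' ∉ t) ∧
      '_' ∉ (ls.foldl pvStepB (toks, cur)).2 ∧
      ls.foldl pvStepA (pvAccOf lead toks cur)
        = pvAccOf lead' (ls.foldl pvStepB (toks, cur)).1 (ls.foldl pvStepB (toks, cur)).2 := by
  induction ls generalizing lead toks cur with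
  | nil => exact ⟨lead, hl, ht, hc, rfl⟩
  | cons c ls ih =>
    obtain ⟨lead1, hl1, ht1, hc1, hstep⟩ := pvStepRel c lead toks cur hl ht hc
    obtain ⟨lead', hl', ht', hc', hrec⟩ :=
      ih lead1 (pvStepB (toks, cur) c).1 (pvStepB (toks, cur) c).2 hl1 ht1 hc1
    refine ⟨lead', hl', by simpa using ht', by simpa using hc', ?_⟩
    simp only [List.foldl_cons, hstep]
    simpa using hrec

-- stripping '_' from lead ++ X ++ trail recovers X when X neither starts nor ends with '_'
lemma pvStrip (lead trail X : List Char)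
    (hl : lead = [] ∨ lead = ['_']) (htr : trail = [] ∨ trail = ['_'])
    (h1 : X.head? ≠ some '_') (h2 : X.getLast? ≠ some '_') (hX : X ≠ []) :
    PySem.Chars.stripChars (lead ++ X ++ trail) ['_'] = X := by
  obtain ⟨a, X', rfl⟩ := List.exists_cons_of_ne_nil hX
  have ha : a ≠ '_' := fun e => h1 (by simp [e])
  have hdrop1 : List.dropWhile (fun c => (['_'] : List Char).contains c)
      (lead ++ (a :: X') ++ trail) = (a :: X') ++ trail := by
    rcases hl with rfl | rfl <;> simp [List.dropWhile_cons, ha]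
  have hXr : (a :: X').reverse ≠ [] := by simp
  obtain ⟨e, R', hR⟩ := List.exists_cons_of_ne_nil hXr
  have hgl : (a :: X').getLast? = some e := by
    rw [← List.head?_reverse, hR]; rfl
  have he : e ≠ '_' := fun e' => h2 (by rw [hgl, e'])
  have hdrop2 : List.dropWhile (fun c => (['_'] : List Char).contains c)
      (trail.reverse ++ (a :: X').reverse) = (a :: X').reverse := by
    rw [hR]
    rcases htr with rfl | rfl <;> simp [List.dropWhile_cons, he]
  simp only [PySem.Chars.stripChars, hdrop1, List.reverse_append, hdrop2]
  simp

-- the two "empty" literals strip to empty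
lemma pvStripLead (lead : List Char) (hl : lead = [] ∨ lead = ['_']) :
    PySem.Chars.stripChars lead ['_'] = [] := by
  rcases hl with rfl | rfl <;> decide

-- final assembly: strip of A's accumulator = join of B's tokens
lemma pvFinal (lead : List Char) (toks : List (List Char)) (cur : List Char)
    (hl : lead = [] ∨ lead = ['_'])
    (ht : ∀ t ∈ toks, t ≠ [] ∧ '_' ∉ t) (hc : '_' ∉ cur) :
    PySem.Chars.stripChars (pvAccOf lead toks cur) ['_']
      = List.intercalate ['_'] (if cur ≠ [] then toks ++ [cur] else toks) := by
  by_cases hcur : cur = []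
  · subst hcur
    by_cases htk : toks = []
    · subst htk
      simp [pvAccOf, pvStripLead lead hl, List.intercalate, List.intersperse]
    · have hacc : pvAccOf lead toks [] = lead ++ List.intercalate ['_'] toks ++ ['_'] := by
        simp [pvAccOf, htk]
      have hs := pvStrip lead ['_'] _ hl (Or.inr rfl)
        (pvJoinHead toks htk ht) (pvJoinLast toks htk ht) (pvIcNe toks htk ht)
      rw [hacc]; simpa using hs
  · have htF : ∀ t ∈ toks ++ [cur], t ≠ [] ∧ '_' ∉ t := by
      intro t htm
      rcases List.mem_append.mp htm with h1 | h1
      · exact ht t h1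
      · obtain rfl : t = cur := by simpa using h1
        exact ⟨hcur, hc⟩
    have hF : (toks ++ [cur] : List (List Char)) ≠ [] := by simp
    have hacc : pvAccOf lead toks cur = lead ++ List.intercalate ['_'] (toks ++ [cur]) := by
      simp [pvAccOf, hcur]
    have hs := pvStrip lead [] _ hl (Or.inl rfl)
      (pvJoinHead _ hF htF) (pvJoinLast _ hF htF) (pvIcNe _ hF htF)
    simp only [List.append_nil] at hs
    rw [hacc]
    simpa [hcur] using hs

-- ===== VERDICT (by name: the statement is the Claim_ definition above) =====
theorem slug_token_py_spec : Claim_equal_slug_token_py := by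
  intro value _
  unfold Spec_slug_token_py slug_token_py slug_token_py_alt
  obtain ⟨lead', hl', ht', hc', hrel⟩ :=
    pvLoopRel ((PySem.Str.lower value).toList) [] [] [] (Or.inl rfl) (by simp) (by simp)
  have hacc0 : pvAccOf [] [] [] = [] := by simp [pvAccOf]
  rw [hacc0] at hrel
  simp only [hrel, PySem.Chars.join]
  rw [pvFinal lead' _ _ hl' ht' hc']
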